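-- pv_equiv track=rewrite | github.com/kennyhn/ME179P | hw3.py | computeBFStree
-- ===== SOURCE A (Python) =====
-- import queue as q
--
-- def computeBFStree(AdjTable,start):
--     # Create the tree by doing a BF search
--
--     # list_of_parents[i]=j where i is the (i+1)-th node and j is the parent of node (i+1)
--     list_of_parents = []
--
--     #initialize empty queue:
--     node_queue = q.Queue()
--     # Insert start node
--     node_queue.put(start) # Use 0-index element 0 in AdjTable is node 1
--
--     for _ in range(len(AdjTable)):
--         list_of_parents.append(None)
--     list_of_parents[start] = start # SELF
--     while node_queue.qsize() != 0:
--         v = node_queue.get()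
--         for node in AdjTable[v]: # Get all the connecting nodes to v
--             if list_of_parents[node] == None:
--                 list_of_parents[node] = v
--                 node_queue.put(node)
--
--     return list_of_parents
-- ===== SOURCE B (Python) =====
-- def computeBFStree(AdjTable, start):
--     # Level-synchronized BFS: plain list frontiers instead of a queue.Queue.
--     parents = [None] * len(AdjTable)
--     parents[start] = start  # SELF
--     frontier = [start]
--     while frontier:
--         next_frontier = []
--         for v in frontier:
--             for node in AdjTable[v]:
--                 if parents[node] is None:
--                     parents[node] = v
--                     next_frontier.append(node)
--         frontier = next_frontier
--     return parents
-- ===== Notes on version B (the rewrite author's own statement) =====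
-- stated objective: simpler
-- what changed: Replaces A's thread-safe queue.Queue FIFO loop with a level-synchronized BFS over plain list frontiers (outer while over whole frontiers, inner loop building next_frontier), which yields the same FIFO discovery order without any queue object.
import Mathlib
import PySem

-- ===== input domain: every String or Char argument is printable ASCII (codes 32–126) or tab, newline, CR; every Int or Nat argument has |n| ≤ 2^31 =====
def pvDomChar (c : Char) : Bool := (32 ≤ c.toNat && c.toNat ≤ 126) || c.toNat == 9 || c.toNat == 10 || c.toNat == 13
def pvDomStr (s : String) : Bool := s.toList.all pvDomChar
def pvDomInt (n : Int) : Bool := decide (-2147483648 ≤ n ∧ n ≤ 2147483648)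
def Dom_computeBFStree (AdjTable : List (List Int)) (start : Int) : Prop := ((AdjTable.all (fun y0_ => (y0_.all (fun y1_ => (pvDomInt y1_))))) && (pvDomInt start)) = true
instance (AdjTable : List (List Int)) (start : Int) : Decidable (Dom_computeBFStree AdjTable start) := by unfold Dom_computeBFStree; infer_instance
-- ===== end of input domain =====

-- B replaces A's queue.Queue-driven while-loop by a level-synchronized BFS over plain list
-- frontiers (same discovery order, no synchronized queue); the RETURN value is proved equal on Pre_.

-- ===== PORT A =====
-- A's while-loop over the FIFO queue (queue = the list argument; put = append at the right,
-- get = take the head).  Fuel (length AdjTable) + 1 is enough: each enqueue after the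
-- start turns one None parent entry into a value, so at most length+1 dequeues ever happen.
def pvBFSLoopA (adj : List (List Int)) : Nat → List Int → List (Option Int) → List (Option Int)
  | 0, _, p => p
  | _ + 1, [], p => p
  | fuel + 1, v :: qs, p =>
    let s := ((PySem.List.pyGet? adj v).getD []).foldl
      (fun (s : List (Option Int) × List Int) node =>
        if PySem.List.pyGet? s.1 node = some none then
          (PySem.List.pySetD s.1 node (some v), s.2 ++ [node])
        else s)
      (p, qs)
    pvBFSLoopA adj fuel s.2 s.1

def computeBFStree (AdjTable : List (List Int)) (start : Int) : List (Option Int) :=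
  let list_of_parents :=
    (List.range AdjTable.length).foldl (fun acc _ => acc ++ [(none : Option Int)]) []
  let list_of_parents := PySem.List.pySetD list_of_parents start (some start)
  pvBFSLoopA AdjTable (AdjTable.length + 1) [start] list_of_parents

-- ===== PORT B =====
-- one whole level of B: fold the inner neighbour loop over the frontier, collecting next_frontier
def pvLevelB (adj : List (List Int)) (s : List (Option Int) × List Int) (v : Int) :
    List (Option Int) × List Int :=
  ((PySem.List.pyGet? adj v).getD []).foldl
    (fun (t : List (Option Int) × List Int) node =>
      if PySem.List.pyGet? t.1 node = some none then
        (PySem.List.pySetD t.1 node (some v), t.2 ++ [node])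
      else t) s

-- B's `while frontier:` loop; each pass consumes one whole frontier (same fuel bound as A)
def pvBFSLoopB (adj : List (List Int)) : Nat → List Int → List (Option Int) → List (Option Int)
  | 0, _, p => p
  | _ + 1, [], p => p
  | fuel + 1, v :: f, p =>
    let s := (v :: f).foldl (pvLevelB adj) (p, [])
    pvBFSLoopB adj fuel s.2 s.1

def computeBFStree_alt (AdjTable : List (List Int)) (start : Int) : List (Option Int) :=
  let parents :=
    PySem.List.pySetD (List.replicate AdjTable.length (none : Option Int)) start (some start)
  pvBFSLoopB AdjTable (AdjTable.length + 1) [start] parents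

-- ===== PRECONDITION & SPEC =====
-- reachability closure used only by Pre_: one expansion step adds every in-range neighbour
-- (as its normalised 0-based index) of the nodes collected so far …
def pvExpand (adj : List (List Int)) (R : List Nat) : List Nat :=
  R.foldl (fun acc v =>
    (((adj[v]?).getD []).foldl (fun (acc2 : List Nat) x =>
      match PySem.List.pyIdx? adj.length x with
      | some k => if k ∈ acc2 then acc2 else acc2 ++ [k]
      | none => acc2) acc)) R

-- … and (length AdjTable) steps reach every node reachable from start
def pvReach (adj : List (List Int)) : Nat → List Nat → List Nat
  | 0, R => R
  | k + 1, R => pvReach adj k (pvExpand adj R)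

-- Pre_ excludes EXACTLY the inputs on which Python A raises IndexError: an out-of-range start,
-- or an out-of-range adjacency entry in a row REACHABLE from start (BFS reads that entry and
-- raises).  Negative in-range entries (Python wraparound) and arbitrary entries in rows BFS
-- never visits stay inside Pre_ and are proved equal.
def Pre_computeBFStree (AdjTable : List (List Int)) (start : Int) : Prop :=
  PySem.Raise.InRange AdjTable.length start ∧
    ∀ v ∈ pvReach AdjTable AdjTable.length (PySem.List.pyIdx? AdjTable.length start).toList,
      ∀ x ∈ (AdjTable[v]?).getD [], PySem.Raise.InRange AdjTable.length x
instance (AdjTable : List (List Int)) (start : Int) : Decidable (Pre_computeBFStree AdjTable start) := by unfold Pre_computeBFStree; infer_instance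

def pvWitness_computeBFStree : List (List Int) × Int := ([[1, 2], [0], [0]], 0)

def Spec_computeBFStree (AdjTable : List (List Int)) (start : Int) (out : List (Option Int)) : Prop := out = computeBFStree_alt AdjTable start
instance (AdjTable : List (List Int)) (start : Int) (out : List (Option Int)) : Decidable (Spec_computeBFStree AdjTable start out) := by unfold Spec_computeBFStree; infer_instance

-- ===== CLAIM (what is proved, stated in full; the proofs are below) =====
def Claim_equal_computeBFStree : Prop := ∀ (AdjTable : List (List Int)) (start : Int), Dom_computeBFStree AdjTable start → Pre_computeBFStree AdjTable start → Spec_computeBFStree AdjTable start (computeBFStree AdjTable start)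

-- ===== LEMMAS AND PROOFS =====

-- the inner neighbour loop shared by both Pythons, as a named step function
def pvInner (v : Int) (t : List (Option Int) × List Int) (node : Int) :
    List (Option Int) × List Int :=
  if PySem.List.pyGet? t.1 node = some none then
    (PySem.List.pySetD t.1 node (some v), t.2 ++ [node])
  else t

lemma pvLoopA_nil (adj : List (List Int)) (fuel : Nat) (p : List (Option Int)) :
    pvBFSLoopA adj fuel [] p = p := by cases fuel <;> rfl

lemma pvLoopB_nil (adj : List (List Int)) (fuel : Nat) (p : List (Option Int)) :
    pvBFSLoopB adj fuel [] p = p := by cases fuel <;> rfl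

lemma pvLoopA_cons (adj : List (List Int)) (fuel : Nat) (v : Int) (qs : List Int)
    (p : List (Option Int)) :
    pvBFSLoopA adj (fuel + 1) (v :: qs) p =
      pvBFSLoopA adj fuel (pvLevelB adj (p, qs) v).2 (pvLevelB adj (p, qs) v).1 := rfl

lemma pvLoopB_cons (adj : List (List Int)) (fuel : Nat) (v : Int) (f : List Int)
    (p : List (Option Int)) :
    pvBFSLoopB adj (fuel + 1) (v :: f) p =
      pvBFSLoopB adj fuel ((v :: f).foldl (pvLevelB adj) (p, [])).2
        ((v :: f).foldl (pvLevelB adj) (p, [])).1 := rfl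

-- a successful read certifies its own index was in range (Python would otherwise raise)
lemma pvGet_some_inRange {α : Type} (xs : List α) (i : Int) (y : α)
    (h : PySem.List.pyGet? xs i = some y) : PySem.Raise.InRange xs.length i := by
  by_contra hn
  rw [(PySem.List.pyGet?_eq_none_iff xs i).mpr hn] at h
  simp at h

-- the inner neighbour fold only appends to its accumulator list
lemma pvInner_acc (v : Int) : ∀ (row : List Int) (p : List (Option Int)) (acc : List Int),
    row.foldl (pvInner v) (p, acc) =
      ((row.foldl (pvInner v) (p, [])).1, acc ++ (row.foldl (pvInner v) (p, [])).2) := by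
  intro row
  induction row with
  | nil => intro p acc; simp
  | cons x row ih =>
    intro p acc
    simp only [List.foldl_cons, pvInner]
    by_cases h : PySem.List.pyGet? p x = some none
    · simp only [h, if_pos]
      rw [ih _ (acc ++ [x]), ih _ ([] ++ [x])]
      simp
    · simp only [h, if_false]
      exact ih p acc

lemma pvIdx_some (n : Nat) (x : Int) (hx : PySem.Raise.InRange n x) :
    ∃ k, PySem.List.pyIdx? n x = some k ∧ k < n := by
  obtain ⟨h1, h2⟩ := hx
  unfold PySem.List.pyIdx?
  by_cases hx0 : (0:Int) ≤ x
  · rw [if_pos hx0, if_pos h2]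
    exact ⟨x.toNat, rfl, by omega⟩
  · rw [if_neg hx0, if_pos h1]
    exact ⟨n - (-x).toNat, rfl, by omega⟩

lemma pvCountP_setNone (v : Int) : ∀ (p : List (Option Int)) (k : Nat),
    p[k]? = some none → (p.set k (some v)).countP Option.isNone + 1 = p.countP Option.isNone := by
  intro p
  induction p with
  | nil => simp
  | cons a p ih =>
    intro k hget
    cases k with
    | zero =>
      simp at hget
      simp [hget]
    | succ k =>
      simp only [List.getElem?_cons_succ] at hget
      simp only [List.set_cons_succ, List.countP_cons]
      have := ih k hget
      omega

-- discovering one node turns exactly one None entry into a parent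
lemma pvSetNone (v : Int) (p : List (Option Int)) (x : Int)
    (h : PySem.List.pyGet? p x = some none) :
    (PySem.List.pySetD p x (some v)).countP Option.isNone + 1 = p.countP Option.isNone := by
  obtain ⟨k, hk, hkn⟩ := pvIdx_some p.length x (pvGet_some_inRange p x none h)
  have hget : p[k]? = some none := by
    simpa [PySem.List.pyGet?, hk] using h
  have hset : PySem.List.pySetD p x (some v) = p.set k (some v) := by
    simp [PySem.List.pySetD, PySem.List.pySet?, hk]
  rw [hset]
  exact pvCountP_setNone v p k hget

lemma pvInner_count (v : Int) : ∀ (row : List Int) (p : List (Option Int)) (acc : List Int),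
    (row.foldl (pvInner v) (p, acc)).1.countP Option.isNone
        + (row.foldl (pvInner v) (p, acc)).2.length
      = p.countP Option.isNone + acc.length := by
  intro row
  induction row with
  | nil => intro p acc; simp
  | cons x row ih =>
    intro p acc
    simp only [List.foldl_cons, pvInner]
    by_cases h : PySem.List.pyGet? p x = some none
    · simp only [h, if_pos]
      have hcnt := pvSetNone v p x h
      have := ih (PySem.List.pySetD p x (some v)) (acc ++ [x])
      simp only [List.length_append, List.length_cons, List.length_nil] at this ⊢
      omega
    · simp only [h, if_false]
      exact ih p acc

lemma pvLevelB_acc (adj : List (List Int)) (v : Int) (p : List (Option Int)) (acc : List Int) :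
    pvLevelB adj (p, acc) v =
      ((pvLevelB adj (p, []) v).1, acc ++ (pvLevelB adj (p, []) v).2) :=
  pvInner_acc v _ p acc

-- the level fold only appends to its next_frontier accumulator
lemma pvLevel_acc (adj : List (List Int)) : ∀ (f : List Int) (p : List (Option Int)) (acc : List Int),
    f.foldl (pvLevelB adj) (p, acc) =
      ((f.foldl (pvLevelB adj) (p, [])).1, acc ++ (f.foldl (pvLevelB adj) (p, [])).2) := by
  intro f
  induction f with
  | nil => intro p acc; simp
  | cons v f ih =>
    intro p acc
    simp only [List.foldl_cons]
    rw [pvLevelB_acc adj v p acc]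
    obtain ⟨q, new⟩ : _ := pvLevelB adj (p, []) v
    rw [ih q (acc ++ new), ih q new]
    simp

lemma pvLevel_count (adj : List (List Int)) :
    ∀ (f : List Int) (p : List (Option Int)) (acc : List Int),
    (f.foldl (pvLevelB adj) (p, acc)).1.countP Option.isNone
        + (f.foldl (pvLevelB adj) (p, acc)).2.length
      = p.countP Option.isNone + acc.length := by
  intro f
  induction f with
  | nil => intro p acc; simp
  | cons v f ih =>
    intro p acc
    simp only [List.foldl_cons]
    have h1 : (pvLevelB adj (p, acc) v).1.countP Option.isNone
        + (pvLevelB adj (p, acc) v).2.length = p.countP Option.isNone + acc.length :=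
      pvInner_count v _ p acc
    set s := pvLevelB adj (p, acc) v with hs
    have h3 := ih s.1 s.2
    rw [show (s.1, s.2) = s from rfl] at h3
    omega

-- A dequeuing a whole frontier prefix of its queue, one node at a time, is one level of B
lemma pvA_split (adj : List (List Int)) :
    ∀ (f r : List Int) (p : List (Option Int)) (fuel : Nat), f.length ≤ fuel →
      pvBFSLoopA adj fuel (f ++ r) p =
        pvBFSLoopA adj (fuel - f.length) (r ++ (f.foldl (pvLevelB adj) (p, [])).2)
          (f.foldl (pvLevelB adj) (p, [])).1 := by
  intro f
  induction f with
  | nil => intro r p fuel _; simp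
  | cons v f ih =>
    intro r p fuel hfuel
    cases fuel with
    | zero => simp at hfuel
    | succ m =>
      rw [List.cons_append, pvLoopA_cons, pvLevelB_acc adj v p (f ++ r)]
      simp only []
      rw [List.append_assoc, ih (r ++ (pvLevelB adj (p, []) v).2) (pvLevelB adj (p, []) v).1 m
        (by simpa using Nat.succ_le_succ_iff.mp hfuel)]
      simp only [List.foldl_cons]
      set s := pvLevelB adj (p, []) v with hs
      rw [show (f.foldl (pvLevelB adj) s) = (f.foldl (pvLevelB adj) (s.1, s.2)) from rfl,
        pvLevel_acc adj f s.1 s.2]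
      simp [List.append_assoc, Nat.succ_sub_succ]

-- queue BFS with enough fuel = level BFS with enough fuel
lemma pvAB (adj : List (List Int)) :
    ∀ (fuelB : Nat) (f : List Int) (p : List (Option Int)) (fuelA : Nat),
      f.length + p.countP Option.isNone ≤ fuelA →
      p.countP Option.isNone < fuelB →
      pvBFSLoopA adj fuelA f p = pvBFSLoopB adj fuelB f p := by
  intro fuelB
  induction fuelB with
  | zero => intro f p fuelA _ hB; omega
  | succ fb ih =>
    intro f p fuelA hA hB
    cases f with
    | nil => rw [pvLoopA_nil, pvLoopB_nil]
    | cons v f =>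
      have hsplit := pvA_split adj (v :: f) [] p fuelA (by simp at hA ⊢; omega)
      simp only [List.append_nil, List.nil_append] at hsplit
      rw [hsplit, pvLoopB_cons]
      set S := (v :: f).foldl (pvLevelB adj) (p, []) with hS
      have hcnt : S.1.countP Option.isNone + S.2.length = p.countP Option.isNone := by
        have := pvLevel_count adj (v :: f) p []
        simpa using this
      by_cases hS2 : S.2 = []
      · rw [hS2, pvLoopA_nil, pvLoopB_nil]
      · refine ih S.2 S.1 _ ?_ ?_
        · have hl : (v :: f).length = f.length + 1 := by simp
          simp only [List.length_cons] at hA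
          omega
        · have h4 := List.length_pos_of_ne_nil hS2
          omega

-- A's append-None initialisation loop builds the all-None array
lemma pvInit_eq (n : Nat) :
    (List.range n).foldl (fun acc _ => acc ++ [(none : Option Int)]) [] =
      List.replicate n (none : Option Int) := by
  rw [PySem.List.foldl_append_singleton_eq_map]
  simp [List.map_const']

-- ===== VERDICT (by name: the statement is the Claim_ definition above) =====
theorem computeBFStree_spec : Claim_equal_computeBFStree := by
  intro adj start _ _
  unfold Spec_computeBFStree computeBFStree computeBFStree_alt
  simp only [pvInit_eq]
  have h1 : (PySem.List.pySetD (List.replicate adj.length (none : Option Int)) start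
      (some start)).countP Option.isNone
      ≤ (PySem.List.pySetD (List.replicate adj.length (none : Option Int)) start
        (some start)).length := List.countP_le_length ..
  rw [PySem.List.length_pySetD, List.length_replicate] at h1
  apply pvAB adj (adj.length + 1) [start] _ (adj.length + 1)
  · simp only [List.length_cons, List.length_nil]
    omega
  · omega
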